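-- pv_equiv track=rewrite | github.com/danyk20/CMS_Runcontrol_Management | runcontrol_reboot.py | sort_services
-- ===== SOURCE A (Python) =====
-- def get_host(service) -> str:
--     """
--     Extracts the host name from a full service name.
--     :param service: Full service name
--     :return: host name
--     """
--     prefix_removed = service.split('@')[1]
--     host = prefix_removed.split('.')[0]
--     return host
--
-- def sort_services(services: list) -> list[str]:
--     """
--     Order services based on their priority: 1# NON 18 or 27 services, 2# 18 services, 3# 27 services
--     :param services: list of services
--     :return: sorted list of services
--     """
--     first = []
--     second = []
--     third = []
--     for service in services:
--         match get_host(service):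
--             case 'srv-s2d16-18-01':
--                 second.append(service)
--                 continue
--             case 'srv-s2d16-27-02':
--                 third.append(service)
--                 continue
--             case default:
--                 first.append(service)
--     return first + second + third
-- ===== SOURCE B (Python) =====
-- def get_host(service) -> str:
--     prefix_removed = service.split('@')[1]
--     host = prefix_removed.split('.')[0]
--     return host
--
--
-- def _priority(host):
--     if host == 'srv-s2d16-18-01':
--         return 1
--     if host == 'srv-s2d16-27-02':
--         return 2
--     return 0
--
--
-- def sort_services(services: list) -> list[str]:
--     """
--     Order services based on their priority: 1# NON 18 or 27 services, 2# 18 services, 3# 27 services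
--     :param services: list of services
--     :return: sorted list of services
--     """
--     return sorted(services, key=lambda service: _priority(get_host(service)))
-- ===== Notes on version B (the rewrite author's own statement) =====
-- stated objective: idiomatic
-- what changed: Replaced the three-bucket partition loop with a single stable sort keyed by a host-priority function (non-18/27 -> 0, 18 -> 1, 27 -> 2); sort stability reproduces the concatenation order exactly.
import Mathlib
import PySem

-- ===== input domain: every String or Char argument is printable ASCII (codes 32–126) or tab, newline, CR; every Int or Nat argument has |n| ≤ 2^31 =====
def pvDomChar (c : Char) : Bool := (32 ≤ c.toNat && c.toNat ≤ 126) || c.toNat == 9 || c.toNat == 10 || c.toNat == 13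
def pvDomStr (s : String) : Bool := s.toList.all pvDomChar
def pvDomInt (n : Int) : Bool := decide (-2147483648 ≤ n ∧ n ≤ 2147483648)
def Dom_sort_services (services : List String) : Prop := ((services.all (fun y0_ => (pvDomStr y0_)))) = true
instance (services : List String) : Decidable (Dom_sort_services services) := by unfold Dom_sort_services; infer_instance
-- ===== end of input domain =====

-- B replaces A's three-bucket partition loop with one stable sort keyed by host priority (idiomatic form, same values).

-- ===== PORT A =====
-- shared helper (both Pythons call the identical get_host); service.split('@')[1] is exact under Pre_ ('@' occurs in each service)
def get_host (service : String) : String :=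
  let prefix_removed := PySem.List.pyGetD ((PySem.Str.split? service "@").getD []) 1 ""
  PySem.List.pyGetD ((PySem.Str.split? prefix_removed ".").getD []) 0 ""

def sort_services (services : List String) : List String :=
  let r := services.foldl
    (fun (st : List String × List String × List String) service =>
      if get_host service = "srv-s2d16-18-01" then (st.1, st.2.1 ++ [service], st.2.2)
      else if get_host service = "srv-s2d16-27-02" then (st.1, st.2.1, st.2.2 ++ [service])
      else (st.1 ++ [service], st.2.1, st.2.2))
    ([], [], [])
  r.1 ++ r.2.1 ++ r.2.2

-- ===== PORT B =====
def priority (host : String) : Int :=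
  if host = "srv-s2d16-18-01" then 1
  else if host = "srv-s2d16-27-02" then 2
  else 0

def sort_services_alt (services : List String) : List String :=
  PySem.List.sorted services (fun service => priority (get_host service)) false

-- ===== PRECONDITION & SPEC =====
-- Pre_ excludes exactly the inputs where Python A raises: a service with no '@' makes split('@')[1] an IndexError.
def Pre_sort_services (services : List String) : Prop :=
  ∀ s ∈ services, PySem.Str.isIn "@" s = true
instance (services : List String) : Decidable (Pre_sort_services services) := by
  unfold Pre_sort_services; infer_instance

def pvWitness_sort_services : List String :=
  ["a@srv-s2d16-27-02.cern.ch", "b@srv-s2d16-18-01.cern.ch", "c@other.cern.ch"]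

def Spec_sort_services (services : List String) (out : List String) : Prop := out = sort_services_alt services
instance (services : List String) (out : List String) : Decidable (Spec_sort_services services out) := by unfold Spec_sort_services; infer_instance

-- ===== CLAIM (what is proved, stated in full; the proofs are below) =====
def Claim_equal_sort_services : Prop := ∀ (services : List String), Dom_sort_services services → Pre_sort_services services → Spec_sort_services services (sort_services services)

-- ===== LEMMAS AND PROOFS =====

def keyOf (s : String) : Int := priority (get_host s)

lemma insertBy_cons_of_before {α : Type} (before : α → α → Bool) (x y : α) (ys : List α)
    (h : before x y = true) :
    PySem.List.insertBy before x (y :: ys) = x :: y :: ys := by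
  simp [PySem.List.insertBy, h]

lemma insertBy_append_left {α : Type} (before : α → α → Bool) (x : α) (ys zs : List α)
    (h : ∀ y ∈ ys, before x y = false) :
    PySem.List.insertBy before x (ys ++ zs) = ys ++ PySem.List.insertBy before x zs := by
  induction ys with
  | nil => simp
  | cons y ys ih =>
    have hy : before x y = false := h y (by simp)
    simp [PySem.List.insertBy, hy, ih (fun a ha => h a (by simp [ha]))]

lemma priority_cases (s : String) : keyOf s = 0 ∨ keyOf s = 1 ∨ keyOf s = 2 := by
  unfold keyOf priority
  split_ifs <;> simp

-- the insertion-sort fold preserves the 0/1/2-bucket shape of the accumulator (key abstract so nothing unfolds)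
lemma foldl_insert_buckets {α : Type} (key : α → Int)
    (hall : ∀ x, key x = 0 ∨ key x = 1 ∨ key x = 2) (xs : List α) :
    ∀ (a b c : List α),
      (∀ y ∈ a, key y = 0) → (∀ y ∈ b, key y = 1) → (∀ y ∈ c, key y = 2) →
      xs.foldl (fun acc x => PySem.List.insertBy (fun p q => decide (key p < key q)) x acc)
        (a ++ b ++ c)
      = (a ++ xs.filter (fun s => key s = 0)) ++ (b ++ xs.filter (fun s => key s = 1))
        ++ (c ++ xs.filter (fun s => key s = 2)) := by
  induction xs with
  | nil => intro a b c _ _ _; simp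
  | cons x xs ih =>
    intro a b c ha hb hc
    rcases hall x with hk | hk | hk
    · have hstep : PySem.List.insertBy (fun p q => decide (key p < key q)) x (a ++ b ++ c)
          = (a ++ [x]) ++ b ++ c := by
        rw [List.append_assoc, insertBy_append_left _ _ a (b ++ c)
          (by intro y hy; simp [ha y hy, hk])]
        cases hbc : b ++ c with
        | nil =>
          obtain ⟨hb0, hc0⟩ := List.append_eq_nil_iff.1 hbc
          subst hb0; subst hc0
          simp [PySem.List.insertBy]
        | cons z zs =>
          have hz : key z = 1 ∨ key z = 2 := by
            have : z ∈ b ++ c := by simp [hbc]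
            rcases List.mem_append.1 this with h | h
            · exact Or.inl (hb z h)
            · exact Or.inr (hc z h)
          have hbf : (decide (key x < key z)) = true := by
            rcases hz with h | h <;> simp [hk, h]
          rw [insertBy_cons_of_before (fun p q => decide (key p < key q)) x z zs hbf]
          simp [hbc]
      have ha' : ∀ y ∈ a ++ [x], key y = 0 := by
        intro y hy
        rcases List.mem_append.1 hy with h | h
        · exact ha y h
        · simp at h; simpa [h] using hk
      rw [List.foldl_cons, hstep, ih (a ++ [x]) b c ha' hb hc]
      simp [hk]
    · have hstep : PySem.List.insertBy (fun p q => decide (key p < key q)) x (a ++ b ++ c)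
          = a ++ (b ++ [x]) ++ c := by
        rw [List.append_assoc, insertBy_append_left _ _ a (b ++ c)
          (by intro y hy; simp [ha y hy, hk]),
          insertBy_append_left _ _ b c (by intro y hy; simp [hb y hy, hk])]
        cases hcc : c with
        | nil => simp [PySem.List.insertBy]
        | cons z zs =>
          have hz : key z = 2 := hc z (by rw [hcc]; simp)
          have hbf : (decide (key x < key z)) = true := by simp [hk, hz]
          rw [insertBy_cons_of_before (fun p q => decide (key p < key q)) x z zs hbf]
          simp
      have hb' : ∀ y ∈ b ++ [x], key y = 1 := by
        intro y hy
        rcases List.mem_append.1 hy with h | h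
        · exact hb y h
        · simp at h; simpa [h] using hk
      rw [List.foldl_cons, hstep, ih a (b ++ [x]) c ha hb' hc]
      simp [hk]
    · have hstep : PySem.List.insertBy (fun p q => decide (key p < key q)) x (a ++ b ++ c)
          = a ++ b ++ (c ++ [x]) := by
        rw [PySem.List.insertBy_of_forall_not_before]
        · simp
        · intro y hy
          have : key y = 0 ∨ key y = 1 ∨ key y = 2 := by
            rcases List.mem_append.1 hy with h | h
            · rcases List.mem_append.1 h with h' | h'
              · exact Or.inl (ha y h')
              · exact Or.inr (Or.inl (hb y h'))
            · exact Or.inr (Or.inr (hc y h))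
          rcases this with h | h | h <;> simp [hk, h]
      have hc' : ∀ y ∈ c ++ [x], key y = 2 := by
        intro y hy
        rcases List.mem_append.1 hy with h | h
        · exact hc y h
        · simp at h; simpa [h] using hk
      rw [List.foldl_cons, hstep, ih a b (c ++ [x]) ha hb hc']
      simp [hk]

lemma sorted_alt_eq_filters (services : List String) :
    sort_services_alt services
      = services.filter (fun s => keyOf s = 0) ++ services.filter (fun s => keyOf s = 1)
        ++ services.filter (fun s => keyOf s = 2) := by
  unfold sort_services_alt
  rw [PySem.List.sorted_eq_foldl_insertBy]
  have := foldl_insert_buckets keyOf priority_cases services [] [] [] (by simp) (by simp) (by simp)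
  simpa [keyOf] using this

-- A's partition fold, characterised by filters
lemma foldl_buckets (xs : List String) :
    ∀ (a b c : List String),
      xs.foldl
        (fun (st : List String × List String × List String) service =>
          if get_host service = "srv-s2d16-18-01" then (st.1, st.2.1 ++ [service], st.2.2)
          else if get_host service = "srv-s2d16-27-02" then (st.1, st.2.1, st.2.2 ++ [service])
          else (st.1 ++ [service], st.2.1, st.2.2))
        (a, b, c)
      = (a ++ xs.filter (fun s => keyOf s = 0), b ++ xs.filter (fun s => keyOf s = 1),
         c ++ xs.filter (fun s => keyOf s = 2)) := by
  induction xs with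
  | nil => intro a b c; simp
  | cons x xs ih =>
    intro a b c
    by_cases h1 : get_host x = "srv-s2d16-18-01"
    · have hk : keyOf x = 1 := by simp [keyOf, priority, h1]
      simp [List.foldl_cons, h1, ih, hk]
    · by_cases h2 : get_host x = "srv-s2d16-27-02"
      · have hk : keyOf x = 2 := by simp [keyOf, priority, h2]
        simp [List.foldl_cons, h2, ih, hk]
      · have hk : keyOf x = 0 := by simp [keyOf, priority, h1, h2]
        simp [List.foldl_cons, h1, h2, ih, hk]

-- ===== VERDICT (by name: the statement is the Claim_ definition above) =====
theorem sort_services_spec : Claim_equal_sort_services := by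
  intro services _ _
  unfold Spec_sort_services
  unfold sort_services
  rw [foldl_buckets services [] [] [], sorted_alt_eq_filters]
  simp
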